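-- pv_equiv track=rewrite | github.com/YamilaTimmer/gene-rearrangement-simulation | gene_rearrangement_simulation.py | find_v_cluster
-- ===== SOURCE A (Python) =====
-- def find_v_cluster(dna_seq, heptamer_indexes, nonamer_indexes):
--     """
--         Finds sequences of v clusters.
--         :param dna_seq: (str) The sequence to search.
--         :param heptamer_indexes: (list) The indexes of all found heptameres.
--         :param nonamer_indexes: (list) The indexes of all found nonameres.
--         :return: cluster_sequences (list) The sequences of v clusters.
--         """
--
--     cluster_sequences = []
--
--     # Adds the first V-cluster (from ATG to the first heptamer
--     v_cluster = dna_seq[0:heptamer_indexes[0]]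
--     cluster_sequences.append(v_cluster)
--
--     #
--     for nonamer_index in nonamer_indexes:
--         for heptamer_index in heptamer_indexes:
--             if heptamer_index > nonamer_index + 9:
--                 v_cluster = dna_seq[nonamer_index + 9:heptamer_index]
--                 cluster_sequences.append(v_cluster)
--                 break
--
--     return cluster_sequences
-- ===== SOURCE B (Python) =====
-- def find_v_cluster(dna_seq, heptamer_indexes, nonamer_indexes):
--     cluster_sequences = [dna_seq[0:heptamer_indexes[0]]]
--
--     # One pass: keep only the running-maximum ("record") heptamer indexes.
--     # The first heptamer in list order exceeding any threshold is always a
--     # record, and the records are strictly increasing, so each nonamer's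
--     # heptamer can be found by binary search instead of a linear scan.
--     stair = []
--     last = None
--     for h in heptamer_indexes:
--         if last is None or h > last:
--             stair.append(h)
--             last = h
--
--     for nonamer_index in nonamer_indexes:
--         threshold = nonamer_index + 9
--         lo, hi = 0, len(stair)
--         while lo < hi:
--             mid = (lo + hi) // 2
--             if stair[mid] > threshold:
--                 hi = mid
--             else:
--                 lo = mid + 1
--         if lo < len(stair):
--             cluster_sequences.append(dna_seq[threshold:stair[lo]])
--     return cluster_sequences
-- ===== Notes on version B (the rewrite author's own statement) =====
-- stated objective: faster
-- what changed: Replaces the per-nonamer linear scan of all heptamer indexes by a one-pass 'running-maximum record' list (strictly increasing) queried with binary search per nonamer.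
import Mathlib
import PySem

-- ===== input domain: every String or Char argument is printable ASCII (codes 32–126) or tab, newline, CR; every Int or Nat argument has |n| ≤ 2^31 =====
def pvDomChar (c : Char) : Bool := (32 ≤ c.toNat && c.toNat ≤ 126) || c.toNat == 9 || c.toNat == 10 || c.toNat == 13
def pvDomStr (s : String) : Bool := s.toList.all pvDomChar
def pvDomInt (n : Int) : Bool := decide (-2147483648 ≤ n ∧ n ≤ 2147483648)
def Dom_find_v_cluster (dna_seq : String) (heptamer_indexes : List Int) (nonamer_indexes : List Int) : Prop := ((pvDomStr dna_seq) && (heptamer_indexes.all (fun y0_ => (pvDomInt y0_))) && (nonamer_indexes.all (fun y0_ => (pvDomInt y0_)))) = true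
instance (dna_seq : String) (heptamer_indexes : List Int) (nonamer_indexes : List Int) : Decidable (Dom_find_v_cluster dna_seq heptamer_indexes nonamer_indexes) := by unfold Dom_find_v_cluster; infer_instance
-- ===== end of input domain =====

-- B replaces A's per-nonamer linear scan of the heptamer list by a one-pass
-- strictly-increasing "record" list queried by binary search (objective: faster).


-- ===== PORT A =====
-- inner 'for heptamer_index in heptamer_indexes: … break' loop of A
def pvInnerA (nonamer_index : Int) : List Int → Option Int
  | [] => none
  | h :: rest => if h > nonamer_index + 9 then some h else pvInnerA nonamer_index rest

def find_v_cluster (dna_seq : String) (heptamer_indexes : List Int) (nonamer_indexes : List Int) : List String :=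
  let cluster0 := PySem.Str.slice dna_seq (some 0) (some ((PySem.List.pyGet? heptamer_indexes 0).getD 0))
  nonamer_indexes.foldl (fun acc nonamer_index =>
    match pvInnerA nonamer_index heptamer_indexes with
    | some heptamer_index => acc ++ [PySem.Str.slice dna_seq (some (nonamer_index + 9)) (some heptamer_index)]
    | none => acc) [cluster0]

-- ===== PORT B =====
-- one pass building the running-maximum records (Source B's first loop)
def pvStair (last : Option Int) : List Int → List Int
  | [] => []
  | h :: rest =>
    match last with
    | none => h :: pvStair (some h) rest
    | some m => if m < h then h :: pvStair (some h) rest else pvStair (some m) rest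

-- Source B's while-loop binary search
def pvBisect (stair : List Int) (threshold : Int) (lo hi : Nat) : Nat :=
  if _h : lo < hi then
    let mid := (lo + hi) / 2
    if threshold < stair.getD mid 0 then pvBisect stair threshold lo mid
    else pvBisect stair threshold (mid + 1) hi
  else lo
termination_by hi - lo
decreasing_by all_goals omega

def find_v_cluster_alt (dna_seq : String) (heptamer_indexes : List Int) (nonamer_indexes : List Int) : List String :=
  let cluster0 := PySem.Str.slice dna_seq (some 0) (some ((PySem.List.pyGet? heptamer_indexes 0).getD 0))
  let stair := pvStair none heptamer_indexes
  nonamer_indexes.foldl (fun acc nonamer_index =>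
    let threshold := nonamer_index + 9
    let lo := pvBisect stair threshold 0 stair.length
    if lo < stair.length then
      acc ++ [PySem.Str.slice dna_seq (some threshold) (some (stair.getD lo 0))]
    else acc) [cluster0]

-- ===== PRECONDITION & SPEC =====
-- Pre_ excludes only heptamer_indexes = [], on which Python A raises IndexError (heptamer_indexes[0]).
def Pre_find_v_cluster (dna_seq : String) (heptamer_indexes : List Int) (nonamer_indexes : List Int) : Prop :=
  heptamer_indexes ≠ []
instance (dna_seq : String) (heptamer_indexes : List Int) (nonamer_indexes : List Int) : Decidable (Pre_find_v_cluster dna_seq heptamer_indexes nonamer_indexes) := by unfold Pre_find_v_cluster; infer_instance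

def pvWitness_find_v_cluster : String × List Int × List Int := ("ACGTACGTACGT", [3, 11], [0])

def Spec_find_v_cluster (dna_seq : String) (heptamer_indexes : List Int) (nonamer_indexes : List Int) (out : List String) : Prop := out = find_v_cluster_alt dna_seq heptamer_indexes nonamer_indexes
instance (dna_seq : String) (heptamer_indexes : List Int) (nonamer_indexes : List Int) (out : List String) : Decidable (Spec_find_v_cluster dna_seq heptamer_indexes nonamer_indexes out) := by unfold Spec_find_v_cluster; infer_instance

-- ===== CLAIM (what is proved, stated in full; the proofs are below) =====
def Claim_equal_find_v_cluster : Prop := ∀ (dna_seq : String) (heptamer_indexes : List Int) (nonamer_indexes : List Int), Dom_find_v_cluster dna_seq heptamer_indexes nonamer_indexes → Pre_find_v_cluster dna_seq heptamer_indexes nonamer_indexes → Spec_find_v_cluster dna_seq heptamer_indexes nonamer_indexes (find_v_cluster dna_seq heptamer_indexes nonamer_indexes)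

-- ===== LEMMAS AND PROOFS =====

-- the records are strictly above the running bound and pairwise increasing
theorem pvStair_bound (hs : List Int) (m : Int) : ∀ x ∈ pvStair (some m) hs, m < x := by
  induction hs generalizing m with
  | nil => simp [pvStair]
  | cons h rest ih =>
    intro x hx
    simp only [pvStair] at hx
    split at hx
    · rcases List.mem_cons.1 hx with rfl | hx'
      · assumption
      · exact lt_trans (by assumption) (ih h x hx')
    · exact ih m x hx

theorem pvStair_sorted (hs : List Int) (last : Option Int) :
    (pvStair last hs).Pairwise (· < ·) := by
  induction hs generalizing last with
  | nil => simp [pvStair]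
  | cons h rest ih =>
    cases last with
    | none =>
      simp only [pvStair]
      exact List.pairwise_cons.2 ⟨pvStair_bound rest h, ih (some h)⟩
    | some m =>
      simp only [pvStair]
      split
      · exact List.pairwise_cons.2 ⟨pvStair_bound rest h, ih (some h)⟩
      · exact ih (some m)

-- scanning the records finds the same first element as scanning the whole list
theorem pvInnerA_stair_some (t : Int) (hs : List Int) (m : Int) (hm : m ≤ t + 9) :
    pvInnerA t (pvStair (some m) hs) = pvInnerA t hs := by
  induction hs generalizing m with
  | nil => rfl
  | cons h rest ih =>
    simp only [pvStair]
    by_cases hmh : m < h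
    · simp only [if_pos hmh]
      by_cases hgt : h > t + 9
      · simp [pvInnerA, hgt]
      · simp only [pvInnerA, if_neg hgt]
        exact ih h (by omega)
    · simp only [if_neg hmh]
      have hle : ¬ h > t + 9 := by omega
      rw [ih m hm]
      simp [pvInnerA, hle]

theorem pvInnerA_stair (t : Int) (hs : List Int) :
    pvInnerA t (pvStair none hs) = pvInnerA t hs := by
  cases hs with
  | nil => rfl
  | cons h rest =>
    simp only [pvStair]
    by_cases hgt : h > t + 9
    · simp [pvInnerA, hgt]
    · simp only [pvInnerA, if_neg hgt]
      exact pvInnerA_stair_some t rest h (by omega)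

-- binary-search invariants
theorem pvBisect_spec (stair : List Int) (thr : Int)
    (hsort : stair.Pairwise (· < ·)) :
    ∀ lo hi, lo ≤ hi → hi ≤ stair.length →
    (∀ k < lo, stair.getD k 0 ≤ thr) →
    (∀ k, hi ≤ k → k < stair.length → thr < stair.getD k 0) →
    (∀ k < pvBisect stair thr lo hi, stair.getD k 0 ≤ thr) ∧
    (∀ k, pvBisect stair thr lo hi ≤ k → k < stair.length → thr < stair.getD k 0) := by
  intro lo hi
  induction lo, hi using pvBisect.induct stair thr with
  | case1 lo hi hlt mid hmid ih =>
    intro _ hhi hlow hhigh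
    rw [pvBisect, dif_pos hlt, if_pos (by simpa [mid] using hmid)]
    refine ih (by omega) (by omega) hlow ?_
    intro k hk hklen
    have hmlen : mid < stair.length := by omega
    rcases Nat.eq_or_lt_of_le hk with rfl | hlt'
    · simpa [List.getD_eq_getElem _ _ hmlen] using hmid
    · have := (List.pairwise_iff_getElem.1 hsort) mid k hmlen hklen hlt'
      have : stair.getD mid 0 < stair.getD k 0 := by
        rw [List.getD_eq_getElem _ _ hmlen, List.getD_eq_getElem _ _ hklen]; exact this
      omega
  | case2 lo hi hlt mid hmid ih =>
    intro _ hhi hlow hhigh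
    rw [pvBisect, dif_pos hlt, if_neg (by simpa [mid] using hmid)]
    refine ih (by omega) hhi ?_ hhigh
    intro k hk
    have hmlen : mid < stair.length := by omega
    have hkm : k ≤ mid := by omega
    rcases Nat.eq_or_lt_of_le hkm with rfl | hlt'
    · simpa [List.getD_eq_getElem _ _ hmlen] using hmid
    · have hklen : k < stair.length := by omega
      have := (List.pairwise_iff_getElem.1 hsort) k mid hklen hmlen hlt'
      have hm' : ¬ thr < stair.getD mid 0 := hmid
      have : stair.getD k 0 < stair.getD mid 0 := by
        rw [List.getD_eq_getElem _ _ hklen, List.getD_eq_getElem _ _ hmlen]; exact this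
      omega
  | case3 lo hi hnlt =>
    intro hle hhi hlow hhigh
    rw [pvBisect, dif_neg hnlt]
    exact ⟨hlow, fun k hk hklen => hhigh k (by omega) hklen⟩

-- the invariants pin down the first element exceeding the threshold
theorem pvInnerA_of_split (t : Int) (l : List Int) (r : Nat)
    (hlow : ∀ k < r, l.getD k 0 ≤ t + 9)
    (hhigh : ∀ k, r ≤ k → k < l.length → t + 9 < l.getD k 0) :
    pvInnerA t l = if r < l.length then some (l.getD r 0) else none := by
  induction l generalizing r with
  | nil => simp [pvInnerA]
  | cons h rest ih =>
    cases r with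
    | zero =>
      have : t + 9 < h := by simpa using hhigh 0 (Nat.zero_le _) (by simp)
      simp [pvInnerA, this]
    | succ s =>
      have hh : h ≤ t + 9 := by simpa using hlow 0 (Nat.succ_pos s)
      have hnot : ¬ h > t + 9 := by omega
      simp only [pvInnerA, if_neg hnot]
      rw [ih s (fun k hk => by simpa using hlow (k + 1) (by omega))
            (fun k hk hklen => by simpa using hhigh (k + 1) (by omega) (by simpa using Nat.succ_lt_succ hklen))]
      simp

-- per-nonamer agreement of the two step functions
theorem pvStep_agree (t : Int) (hept : List Int) :
    pvInnerA t hept =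
      (if pvBisect (pvStair none hept) (t + 9) 0 (pvStair none hept).length < (pvStair none hept).length
       then some ((pvStair none hept).getD (pvBisect (pvStair none hept) (t + 9) 0 (pvStair none hept).length) 0)
       else none) := by
  set stair := pvStair none hept with hst
  obtain ⟨hlow, hhigh⟩ :=
    pvBisect_spec stair (t + 9) (hst ▸ pvStair_sorted hept none) 0 stair.length
      (Nat.zero_le _) le_rfl (by omega) (by omega)
  rw [← pvInnerA_stair t hept, ← hst]
  exact pvInnerA_of_split t stair _ hlow hhigh

-- ===== VERDICT (by name: the statement is the Claim_ definition above) =====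
theorem find_v_cluster_spec : Claim_equal_find_v_cluster := by
  intro dna_seq hept non _ _
  unfold Spec_find_v_cluster find_v_cluster find_v_cluster_alt
  apply PySem.List.foldl_congr_mem
  intro acc t _
  rw [pvStep_agree t hept]
  by_cases hc : pvBisect (pvStair none hept) (t + 9) 0 (pvStair none hept).length < (pvStair none hept).length
  · simp only [if_pos hc]
  · simp only [if_neg hc]
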